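-- pv_equiv track=rewrite | github.com/DragunWF/Competitive-Programming | CodeWars/python/7_kyu/quicksum.py | quicksum
-- ===== SOURCE A (Python) =====
-- def quicksum(packet: str) -> int:
--     output = 0
--     for i, char in enumerate(packet):
--         is_uppercase_letter = char.isalpha() and char.isupper()
--         if char != " " and not is_uppercase_letter:
--             return 0
--         if not is_uppercase_letter:
--             continue
--         output += (i + 1) * (ord(char) - 64)
--     return output
-- ===== SOURCE B (Python) =====
-- def quicksum(packet: str) -> int:
--     # Right-to-left scan: `run` is the value-sum of the suffix seen so far; adding it
--     # at each step makes each letter counted (index+1) times, with no multiplication.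
--     run = total = 0
--     for c in reversed(packet):
--         if c == " ":
--             total += run
--         elif c.isalpha() and c.isupper():
--             run += ord(c) - 64
--             total += run
--         else:
--             return 0
--     return total
-- ===== Notes on version B (the rewrite author's own statement) =====
-- stated objective: alternative
-- what changed: Replaces A's forward enumerate loop with (i+1)*value multiplications by a reverse scan maintaining a running suffix value-sum that is re-added each step, so each letter is implicitly counted position+1 times without any index or multiplication.
import Mathlib
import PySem

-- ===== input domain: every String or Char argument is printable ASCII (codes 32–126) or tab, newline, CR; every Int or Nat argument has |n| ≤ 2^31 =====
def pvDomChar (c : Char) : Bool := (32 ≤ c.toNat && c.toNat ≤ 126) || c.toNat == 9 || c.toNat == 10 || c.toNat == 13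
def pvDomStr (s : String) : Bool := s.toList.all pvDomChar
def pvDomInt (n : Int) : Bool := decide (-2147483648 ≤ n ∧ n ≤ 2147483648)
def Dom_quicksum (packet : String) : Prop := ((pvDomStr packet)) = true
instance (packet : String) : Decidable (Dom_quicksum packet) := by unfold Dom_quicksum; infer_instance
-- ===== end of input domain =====

-- B replaces A's forward indexed loop with (i+1)*value products by a reverse scan that
-- keeps a running suffix value-sum and re-adds it each step (no index, no multiplication).

-- ===== PORT A =====
-- A's for-loop: index i, accumulator output, early return 0 on an invalid char
def quicksumGo : List Char → Nat → Int → Int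
  | [], _, output => output
  | c :: rest, i, output =>
    let isUp := PySem.Chars.isalpha c && PySem.Chars.isupper c
    if c != ' ' && !isUp then 0
    else if !isUp then quicksumGo rest (i + 1) output
    else quicksumGo rest (i + 1) (output + ((i : Int) + 1) * ((c.toNat : Int) - 64))

def quicksum (packet : String) : Int := quicksumGo packet.toList 0 0

-- ===== PORT B =====
-- Source B's reversed loop: state (run, total); space adds run, a letter bumps run then adds it
def quicksumAltGo : List Char → Int → Int → Int
  | [], _, total => total
  | c :: rest, run, total =>
    if c == ' ' then quicksumAltGo rest run (total + run)
    else if PySem.Chars.isalpha c && PySem.Chars.isupper c then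
      quicksumAltGo rest (run + ((c.toNat : Int) - 64)) (total + (run + ((c.toNat : Int) - 64)))
    else 0

def quicksum_alt (packet : String) : Int := quicksumAltGo packet.toList.reverse 0 0

-- ===== PRECONDITION & SPEC =====
def Spec_quicksum (packet : String) (out : Int) : Prop := out = quicksum_alt packet
instance (packet : String) (out : Int) : Decidable (Spec_quicksum packet out) := by unfold Spec_quicksum; infer_instance

-- ===== CLAIM (what is proved, stated in full; the proofs are below) =====
def Claim_equal_quicksum : Prop := ∀ (packet : String), Dom_quicksum packet → Spec_quicksum packet (quicksum packet)

-- ===== LEMMAS AND PROOFS =====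

-- a char A rejects (neither space nor uppercase letter)
def pvBad (c : Char) : Bool := c != ' ' && !(PySem.Chars.isalpha c && PySem.Chars.isupper c)

-- the value a valid char contributes (0 for space)
def pvVal (c : Char) : Int := if c == ' ' then 0 else (c.toNat : Int) - 64

-- forward weighted sum starting at index i (A's shape)
def pvW : List Char → Nat → Int
  | [], _ => 0
  | c :: rest, i => ((i : Int) + 1) * pvVal c + pvW rest (i + 1)

-- backward weighted sum: head counts length-many times (B's shape)
def pvWrev : List Char → Int
  | [] => 0
  | c :: rest => ((rest.length : Int) + 1) * pvVal c + pvWrev rest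

theorem goA_invalid (l : List Char) (i : Nat) (out : Int)
    (h : l.any pvBad = true) : quicksumGo l i out = 0 := by
  induction l generalizing i out with
  | nil => simp at h
  | cons c rest ih =>
    simp only [List.any_cons, Bool.or_eq_true] at h
    rw [quicksumGo]
    by_cases hb : pvBad c = true
    · simp only [pvBad] at hb; simp only [hb, if_true]
    · have hr := h.resolve_left hb
      simp only [pvBad] at hb
      rw [if_neg hb]
      split <;> exact ih _ _ hr

theorem goA_valid (l : List Char) (i : Nat) (out : Int)
    (h : l.any pvBad = false) : quicksumGo l i out = out + pvW l i := by
  induction l generalizing i out with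
  | nil => simp [quicksumGo, pvW]
  | cons c rest ih =>
    simp only [List.any_cons, Bool.or_eq_false_iff] at h
    obtain ⟨hc, hr⟩ := h
    rw [quicksumGo, pvW]
    by_cases hsp : c = ' '
    · subst hsp
      rw [if_neg (by decide), if_pos (by decide), ih _ _ hr]
      simp [pvVal]
    · have hup : (PySem.Chars.isalpha c && PySem.Chars.isupper c) = true := by
        simp only [pvBad, Bool.and_eq_false_iff] at hc
        rcases hc with h1 | h2
        · exact absurd (by simpa using h1) hsp
        · simpa using h2
      have hbe : (c == ' ') = false := by simpa using hsp
      rw [if_neg (by simp [hup]), if_neg (by simp [hup]), ih _ _ hr]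
      simp only [pvVal, hbe, if_false, Bool.false_eq_true]
      push_cast
      ring

theorem goB_invalid (l : List Char) (run total : Int)
    (h : l.any pvBad = true) : quicksumAltGo l run total = 0 := by
  induction l generalizing run total with
  | nil => simp at h
  | cons c rest ih =>
    simp only [List.any_cons, Bool.or_eq_true] at h
    rw [quicksumAltGo]
    by_cases hb : pvBad c = true
    · simp only [pvBad, Bool.and_eq_true, bne_iff_ne, ne_eq, Bool.not_eq_true'] at hb
      rw [if_neg (by simpa using hb.1), if_neg (by simp [hb.2])]
    · have hr := h.resolve_left hb
      split
      · exact ih _ _ hr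
      · split
        · exact ih _ _ hr
        · rfl

theorem goB_valid (l : List Char) (run total : Int)
    (h : l.any pvBad = false) :
    quicksumAltGo l run total = total + (l.length : Int) * run + pvWrev l := by
  induction l generalizing run total with
  | nil => simp [quicksumAltGo, pvWrev]
  | cons c rest ih =>
    simp only [List.any_cons, Bool.or_eq_false_iff] at h
    obtain ⟨hc, hr⟩ := h
    rw [quicksumAltGo, pvWrev]
    by_cases hsp : c = ' '
    · subst hsp
      rw [if_pos (by decide), ih _ _ hr]
      simp [pvVal]
      push_cast
      ring
    · have hup : (PySem.Chars.isalpha c && PySem.Chars.isupper c) = true := by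
        simp only [pvBad, Bool.and_eq_false_iff] at hc
        rcases hc with h1 | h2
        · exact absurd (by simpa using h1) hsp
        · simpa using h2
      have hbe : (c == ' ') = false := by simpa using hsp
      rw [if_neg (by simp [hbe]), if_pos hup, ih _ _ hr]
      simp only [pvVal, hbe, if_false, Bool.false_eq_true, List.length_cons]
      push_cast
      ring

theorem pvW_append (a : List Char) (c : Char) (i : Nat) :
    pvW (a ++ [c]) i = pvW a i + ((i : Int) + (a.length : Int) + 1) * pvVal c := by
  induction a generalizing i with
  | nil => simp [pvW]
  | cons d rest ih =>
    simp only [List.cons_append, pvW, ih, List.length_cons]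
    push_cast
    ring

theorem pvWrev_eq_reverse (l : List Char) : pvWrev l = pvW l.reverse 0 := by
  induction l with
  | nil => simp [pvWrev, pvW]
  | cons c rest ih =>
    rw [pvWrev, ih, List.reverse_cons, pvW_append]
    simp only [List.length_reverse]
    ring

-- ===== VERDICT (by name: the statement is the Claim_ definition above) =====
theorem quicksum_spec : Claim_equal_quicksum := by
  intro packet _
  unfold Spec_quicksum quicksum quicksum_alt
  set l := packet.toList with hl
  by_cases h : l.any pvBad = true
  · rw [goA_invalid _ _ _ h, goB_invalid _ _ _ (by simpa using h)]
  · have h' := Bool.eq_false_iff.mpr h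
    rw [goA_valid _ _ _ h', goB_valid _ _ _ (by simpa using h'),
        pvWrev_eq_reverse, List.reverse_reverse]
    ring
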